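-- pv_equiv track=rewrite | github.com/DessimozLab/gethogs | lib.py | get_all_pr_between_two_set_of_HOGs
-- ===== SOURCE A (Python) =====
-- def get_all_pr_between_two_set_of_HOGs(orthograph, list_hogs1, list_hogs2):
--     """
--     return the numbers of extant orthologous relations between two set of hogs
--     :param orthograph:
--     :param list_hogs1:
--     :param list_hogs2:
--     :return:
--     """
--     pairwise_relations = 0
--     for hog1 in list_hogs1:
--         for hog2 in list_hogs2:
--             try:
--                 pairwise_relations += orthograph[(hog1,hog2)]
--             except KeyError:
--                 try:
--                     pairwise_relations += orthograph[(hog2,hog1)]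
--                 except KeyError:
--                     pass
--
--     return pairwise_relations
-- ===== SOURCE B (Python) =====
-- def get_all_pr_between_two_set_of_HOGs(orthograph, list_hogs1, list_hogs2):
--     """
--     return the numbers of extant orthologous relations between two set of hogs
--     (single pass over the sparse orthograph instead of all hog pairs)
--     """
--     count1 = {}
--     for h in list_hogs1:
--         count1[h] = count1.get(h, 0) + 1
--     count2 = {}
--     for h in list_hogs2:
--         count2[h] = count2.get(h, 0) + 1
--     total = 0
--     for key, v in orthograph.items():
--         if len(key) != 2:
--             continue
--         a, b = key
--         total += v * count1.get(a, 0) * count2.get(b, 0)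
--         if (b, a) not in orthograph:
--             total += v * count1.get(b, 0) * count2.get(a, 0)
--     return total
-- ===== Notes on version B (the rewrite author's own statement) =====
-- stated objective: faster
-- what changed: Instead of scanning all |hogs1|*|hogs2| pairs with two dict lookups each, B builds multiplicity counters for the two hog lists once and makes a single pass over the sparse orthograph entries, adding value*count1[a]*count2[b] per key (a,b) plus the reversed contribution when the reversed key is absent, replicating A's direction preference.
import Mathlib
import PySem

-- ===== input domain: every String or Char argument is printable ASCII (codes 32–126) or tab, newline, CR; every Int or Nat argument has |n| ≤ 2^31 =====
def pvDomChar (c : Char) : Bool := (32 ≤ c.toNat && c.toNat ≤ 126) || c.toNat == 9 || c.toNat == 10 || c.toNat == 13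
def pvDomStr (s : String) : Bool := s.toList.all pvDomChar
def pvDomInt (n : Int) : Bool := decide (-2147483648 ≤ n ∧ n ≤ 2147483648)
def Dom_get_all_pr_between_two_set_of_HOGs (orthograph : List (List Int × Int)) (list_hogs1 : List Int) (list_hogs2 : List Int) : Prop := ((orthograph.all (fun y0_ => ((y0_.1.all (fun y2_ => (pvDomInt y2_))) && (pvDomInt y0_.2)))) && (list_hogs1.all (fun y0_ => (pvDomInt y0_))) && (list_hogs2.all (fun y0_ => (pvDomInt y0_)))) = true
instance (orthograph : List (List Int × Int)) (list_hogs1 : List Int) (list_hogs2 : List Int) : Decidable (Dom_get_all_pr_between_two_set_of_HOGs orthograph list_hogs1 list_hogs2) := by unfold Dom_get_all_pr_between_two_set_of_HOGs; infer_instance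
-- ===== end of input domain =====

-- B replaces A's scan over all |hogs1|*|hogs2| pairs by one pass over the sparse orthograph
-- entries against precomputed multiplicity counters of the two hog lists (objective: faster).


-- ===== PORT A =====
def get_all_pr_between_two_set_of_HOGs (orthograph : List (List Int × Int)) (list_hogs1 : List Int) (list_hogs2 : List Int) : Int :=
  list_hogs1.foldl (fun pairwise_relations hog1 =>
    list_hogs2.foldl (fun pairwise_relations hog2 =>
      match (PySem.Dict.mk orthograph).get? [hog1, hog2] with
      | some v => pairwise_relations + v
      | none =>
        match (PySem.Dict.mk orthograph).get? [hog2, hog1] with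
        | some v => pairwise_relations + v
        | none => pairwise_relations) pairwise_relations) 0

-- ===== PORT B =====
def get_all_pr_between_two_set_of_HOGs_alt (orthograph : List (List Int × Int)) (list_hogs1 : List Int) (list_hogs2 : List Int) : Int :=
  let count1 := list_hogs1.foldl (fun d h => d.insert h (d.getD h 0 + 1)) PySem.Dict.empty
  let count2 := list_hogs2.foldl (fun d h => d.insert h (d.getD h 0 + 1)) PySem.Dict.empty
  orthograph.foldl (fun total kv =>
    match kv.1 with
    | [a, b] =>
      let t := total + kv.2 * count1.getD a 0 * count2.getD b 0
      if (PySem.Dict.mk orthograph).contains [b, a] then t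
      else t + kv.2 * count1.getD b 0 * count2.getD a 0
    | _ => total) 0

-- ===== PRECONDITION & SPEC =====
-- Pre_ excludes association lists with duplicate keys: those do not represent any Python dict
-- (Python collapses duplicate keys before either function runs), so the first-match reading of
-- the list is accidental there.
def Pre_get_all_pr_between_two_set_of_HOGs (orthograph : List (List Int × Int)) (list_hogs1 : List Int) (list_hogs2 : List Int) : Prop :=
  (orthograph.map Prod.fst).Nodup
instance (orthograph : List (List Int × Int)) (list_hogs1 : List Int) (list_hogs2 : List Int) : Decidable (Pre_get_all_pr_between_two_set_of_HOGs orthograph list_hogs1 list_hogs2) := by unfold Pre_get_all_pr_between_two_set_of_HOGs; infer_instance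
def pvWitness_get_all_pr_between_two_set_of_HOGs : (List (List Int × Int)) × List Int × List Int := ([([1, 2], 3)], [1], [2])
def Spec_get_all_pr_between_two_set_of_HOGs (orthograph : List (List Int × Int)) (list_hogs1 : List Int) (list_hogs2 : List Int) (out : Int) : Prop := out = get_all_pr_between_two_set_of_HOGs_alt orthograph list_hogs1 list_hogs2
instance (orthograph : List (List Int × Int)) (list_hogs1 : List Int) (list_hogs2 : List Int) (out : Int) : Decidable (Spec_get_all_pr_between_two_set_of_HOGs orthograph list_hogs1 list_hogs2 out) := by unfold Spec_get_all_pr_between_two_set_of_HOGs; infer_instance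

-- ===== CLAIM (what is proved, stated in full; the proofs are below) =====
def Claim_equal_get_all_pr_between_two_set_of_HOGs : Prop := ∀ (orthograph : List (List Int × Int)) (list_hogs1 : List Int) (list_hogs2 : List Int), Dom_get_all_pr_between_two_set_of_HOGs orthograph list_hogs1 list_hogs2 → Pre_get_all_pr_between_two_set_of_HOGs orthograph list_hogs1 list_hogs2 → Spec_get_all_pr_between_two_set_of_HOGs orthograph list_hogs1 list_hogs2 (get_all_pr_between_two_set_of_HOGs orthograph list_hogs1 list_hogs2)

-- ===== LEMMAS AND PROOFS =====

-- A's per-pair contribution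
def pvF (O : List (List Int × Int)) (h1 h2 : Int) : Int :=
  match (PySem.Dict.mk O).get? [h1, h2] with
  | some v => v
  | none => ((PySem.Dict.mk O).get? [h2, h1]).getD 0

-- per-entry contribution seen from one pair
def pvE (O : List (List Int × Int)) (kv : List Int × Int) (h1 h2 : Int) : Int :=
  if kv.1 = [h1, h2] then kv.2
  else if kv.1 = [h2, h1] ∧ (PySem.Dict.mk O).get? [h1, h2] = none then kv.2 else 0

-- B's per-entry contribution
def pvG (O : List (List Int × Int)) (l1 l2 : List Int) (kv : List Int × Int) : Int :=
  match kv.1 with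
  | [a, b] =>
      (kv.2 * (l1.count a : Int) * (l2.count b : Int)) +
      (if (PySem.Dict.mk O).contains [b, a] then 0
       else kv.2 * (l1.count b : Int) * (l2.count a : Int))
  | _ => 0

lemma pv_sum_ite_count (l : List Int) (c w : Int) :
    (l.map (fun x => if x = c then w else 0)).sum = w * (l.count c : Int) := by
  induction l with
  | nil => simp
  | cons x xs ih =>
    simp only [List.map_cons, List.sum_cons, ih, List.count_cons]
    by_cases h : x = c <;> simp [h] <;> push_cast <;> ring

lemma pv_sum_ite_pair (l1 l2 : List Int) (a b w : Int) :
    (l1.map (fun h1 => (l2.map (fun h2 => if h1 = a ∧ h2 = b then w else 0)).sum)).sum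
      = w * (l1.count a : Int) * (l2.count b : Int) := by
  have inner : ∀ h1, (l2.map (fun h2 => if h1 = a ∧ h2 = b then w else 0)).sum
      = if h1 = a then w * (l2.count b : Int) else 0 := by
    intro h1
    by_cases h : h1 = a
    · simpa [h] using pv_sum_ite_count l2 b w
    · simp [h]
  simp only [inner]
  have := pv_sum_ite_count l1 a (w * (l2.count b : Int))
  rw [this]; ring

lemma pv_sum_swap (l : List Int) (O : List (List Int × Int)) (F : List Int × Int → Int → Int) :
    (l.map (fun a => (O.map (fun kv => F kv a)).sum)).sum
      = (O.map (fun kv => (l.map (F kv)).sum)).sum := by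
  induction l with
  | nil => simp
  | cons x xs ih =>
    simp only [List.map_cons, List.sum_cons, ih]
    rw [← PySem.List.sum_map_add_int]

lemma pv_sum_ite_key (O : List (List Int × Int)) (K : List Int)
    (hnd : (O.map Prod.fst).Nodup) :
    (O.map (fun kv => if kv.1 = K then kv.2 else 0)).sum = ((PySem.Dict.mk O).get? K).getD 0 := by
  induction O with
  | nil => simp [PySem.Dict.get?]
  | cons kv rest ih =>
    simp only [List.map_cons, List.nodup_cons] at hnd
    obtain ⟨hni, hnd'⟩ := hnd
    simp only [List.map_cons, List.sum_cons]
    rw [show (PySem.Dict.mk (kv :: rest)) = PySem.Dict.mk ((kv.1, kv.2) :: rest) by rfl,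
      PySem.Dict.get?_mk_cons]
    by_cases h : kv.1 = K
    · subst h
      have hz : (rest.map (fun kv' => if kv'.1 = kv.1 then kv'.2 else 0)).sum = 0 := by
        have : ∀ kv' ∈ rest, (if kv'.1 = kv.1 then kv'.2 else 0) = 0 := by
          intro kv' hm
          have : kv'.1 ≠ kv.1 := by
            intro he; exact hni (he ▸ List.mem_map_of_mem hm)
          simp [this]
        rw [List.map_congr_left this]; simp
      simp [hz]
    · have hb : (kv.1 == K) = false := by simpa using h
      simp only [hb, if_neg h]
      simpa using ih hnd'

lemma pv_f_eq_sum_e (O : List (List Int × Int)) (hnd : (O.map Prod.fst).Nodup) (h1 h2 : Int) :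
    pvF O h1 h2 = (O.map (fun kv => pvE O kv h1 h2)).sum := by
  rcases hg : (PySem.Dict.mk O).get? [h1, h2] with _ | v
  · -- direct key absent: entries contribute via the reversed key only
    have hmap : ∀ kv ∈ O, pvE O kv h1 h2 = if kv.1 = [h2, h1] then kv.2 else 0 := by
      intro kv hm
      have h1n : kv.1 ≠ [h1, h2] := by
        intro he
        have : [h1, h2] ∈ (PySem.Dict.mk O).keys := by
          rw [PySem.Dict.keys_mk]; exact he ▸ List.mem_map_of_mem hm
        exact ((PySem.Dict.get?_eq_none_iff_not_mem_keys _ _).mp hg) this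
      simp [pvE, h1n, hg]
    rw [List.map_congr_left hmap, pv_sum_ite_key O [h2, h1] hnd]
    simp [pvF, hg]
  · -- direct key present
    have hmap : ∀ kv ∈ O, pvE O kv h1 h2 = if kv.1 = [h1, h2] then kv.2 else 0 := by
      intro kv _
      simp [pvE, hg]
    rw [List.map_congr_left hmap, pv_sum_ite_key O [h1, h2] hnd]
    simp [pvF, hg]

lemma pv_not_two (kv : List Int × Int) (h : ∀ a b : Int, kv.1 ≠ [a, b]) (O : List (List Int × Int))
    (h1 h2 : Int) : pvE O kv h1 h2 = 0 := by
  simp [pvE, h h1 h2, h h2 h1]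

lemma pv_entry_sum (O : List (List Int × Int)) (hnd : (O.map Prod.fst).Nodup)
    (l1 l2 : List Int) (kv : List Int × Int) (hm : kv ∈ O) :
    (l1.map (fun h1 => (l2.map (fun h2 => pvE O kv h1 h2)).sum)).sum = pvG O l1 l2 kv := by
  have hzero : (∀ a b : Int, kv.1 ≠ [a, b]) → pvG O l1 l2 kv = 0 ∧
      (l1.map (fun h1 => (l2.map (fun h2 => pvE O kv h1 h2)).sum)).sum = 0 := by
    intro hnot
    constructor
    · rcases kv with ⟨k, v⟩
      rcases k with _ | ⟨a, t⟩
      · simp [pvG]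
      rcases t with _ | ⟨b, t2⟩
      · simp [pvG]
      rcases t2 with _ | ⟨c, t3⟩
      · exact absurd rfl (hnot a b)
      · simp [pvG]
    · apply List.sum_eq_zero
      intro x hx
      obtain ⟨h1, -, rfl⟩ := List.mem_map.mp hx
      apply List.sum_eq_zero
      intro y hy
      obtain ⟨h2, -, rfl⟩ := List.mem_map.mp hy
      exact pv_not_two kv hnot O h1 h2
  rcases hk : kv.1 with _ | ⟨a, t⟩
  · obtain ⟨hg, hs⟩ := hzero (by intro a b h; rw [hk] at h; cases h)
    rw [hs, hg]
  rcases ht : t with _ | ⟨b, t2⟩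
  · obtain ⟨hg, hs⟩ := hzero (by intro x y h; rw [hk, ht] at h; simp at h)
    rw [hs, hg]
  rcases ht2 : t2 with _ | ⟨c, t3⟩
  swap
  · obtain ⟨hg, hs⟩ := hzero (by intro x y h; rw [hk, ht, ht2] at h; simp at h)
    rw [hs, hg]
  -- kv.1 = [a, b]
  have hk2 : kv.1 = [a, b] := by rw [hk, ht, ht2]
  have hmemk : [a, b] ∈ (PySem.Dict.mk O).keys := by
    rw [PySem.Dict.keys_mk]; exact hk2 ▸ List.mem_map_of_mem hm
  by_cases hc : (PySem.Dict.mk O).get? [b, a] = none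
  · -- reversed key absent; then a ≠ b and the direct and reversed cases are disjoint
    have hab : a ≠ b := by
      intro he
      exact ((PySem.Dict.get?_eq_none_iff_not_mem_keys _ _).mp hc) (by rw [he] at hmemk ⊢; exact hmemk)
    have hcont : (PySem.Dict.mk O).contains [b, a] = false := by
      rw [PySem.Dict.contains_eq_isSome_get?, hc]; rfl
    have hpt : ∀ h1 h2 : Int, pvE O kv h1 h2 =
        (if h1 = a ∧ h2 = b then kv.2 else 0) + (if h1 = b ∧ h2 = a then kv.2 else 0) := by
      intro h1 h2
      unfold pvE
      rw [hk2]
      by_cases e1 : h1 = a ∧ h2 = b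
      · obtain ⟨ea, eb⟩ := e1
        rw [if_pos (by rw [ea, eb]), if_pos ⟨ea, eb⟩,
          if_neg (fun h => hab (ea.symm.trans h.1)), add_zero]
      · have hne : ¬([a, b] : List Int) = [h1, h2] := by
          intro he; simp only [List.cons.injEq, and_true] at he
          exact e1 ⟨he.1.symm, he.2.symm⟩
        rw [if_neg hne, if_neg e1, zero_add]
        by_cases e2 : h1 = b ∧ h2 = a
        · obtain ⟨eb, ea⟩ := e2
          rw [if_pos ⟨by rw [ea, eb], by rw [eb, ea]; exact hc⟩, if_pos ⟨eb, ea⟩]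
        · rw [if_neg, if_neg e2]
          rintro ⟨hrev, -⟩
          simp only [List.cons.injEq, and_true] at hrev
          exact e2 ⟨hrev.2.symm, hrev.1.symm⟩
    calc (l1.map (fun h1 => (l2.map (fun h2 => pvE O kv h1 h2)).sum)).sum
        = (l1.map (fun h1 => (l2.map (fun h2 =>
            (if h1 = a ∧ h2 = b then kv.2 else 0) + (if h1 = b ∧ h2 = a then kv.2 else 0))).sum)).sum := by
          refine congrArg List.sum (List.map_congr_left fun h1 _ => ?_)
          exact congrArg List.sum (List.map_congr_left fun h2 _ => hpt h1 h2)
      _ = pvG O l1 l2 kv := by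
          have hsplit : ∀ h1 : Int, (l2.map (fun h2 =>
              (if h1 = a ∧ h2 = b then kv.2 else 0) + (if h1 = b ∧ h2 = a then kv.2 else 0))).sum
              = (l2.map (fun h2 => if h1 = a ∧ h2 = b then kv.2 else 0)).sum
                + (l2.map (fun h2 => if h1 = b ∧ h2 = a then kv.2 else 0)).sum := by
            intro h1; exact PySem.List.sum_map_add_int l2 _ _
          rw [List.map_congr_left (fun h1 (_ : h1 ∈ l1) => hsplit h1), PySem.List.sum_map_add_int,
            pv_sum_ite_pair, pv_sum_ite_pair]
          simp [pvG, hk2, hcont]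
  · -- reversed key present: the reversed branch of pvE never fires for this entry
    rcases hv : (PySem.Dict.mk O).get? [b, a] with _ | v
    · exact absurd hv hc
    have hcont : (PySem.Dict.mk O).contains [b, a] = true := by
      rw [PySem.Dict.contains_eq_isSome_get?, hv]; rfl
    have hpt : ∀ h1 h2 : Int, pvE O kv h1 h2 = (if h1 = a ∧ h2 = b then kv.2 else 0) := by
      intro h1 h2
      unfold pvE
      rw [hk2]
      by_cases e1 : h1 = a ∧ h2 = b
      · obtain ⟨ea, eb⟩ := e1
        rw [if_pos (by rw [ea, eb]), if_pos ⟨ea, eb⟩]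
      · have hne : ¬([a, b] : List Int) = [h1, h2] := by
          intro he; simp only [List.cons.injEq, and_true] at he
          exact e1 ⟨he.1.symm, he.2.symm⟩
        rw [if_neg hne, if_neg e1, if_neg]
        rintro ⟨hrev, hnone⟩
        simp only [List.cons.injEq, and_true] at hrev
        obtain ⟨ea, eb⟩ := hrev
        rw [← ea, ← eb] at hnone
        rw [hv] at hnone
        cases hnone
    calc (l1.map (fun h1 => (l2.map (fun h2 => pvE O kv h1 h2)).sum)).sum
        = (l1.map (fun h1 => (l2.map (fun h2 => if h1 = a ∧ h2 = b then kv.2 else 0)).sum)).sum := by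
          refine congrArg List.sum (List.map_congr_left fun h1 _ => ?_)
          exact congrArg List.sum (List.map_congr_left fun h2 _ => hpt h1 h2)
      _ = pvG O l1 l2 kv := by
          rw [pv_sum_ite_pair]
          simp [pvG, hk2, hcont]

lemma pv_A_eq_sum (O : List (List Int × Int)) (l1 l2 : List Int) :
    get_all_pr_between_two_set_of_HOGs O l1 l2
      = (l1.map (fun h1 => (l2.map (fun h2 => pvF O h1 h2)).sum)).sum := by
  unfold get_all_pr_between_two_set_of_HOGs
  have hin : ∀ h1 : Int, (fun (pr : Int) (h2 : Int) =>
      match (PySem.Dict.mk O).get? [h1, h2] with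
      | some v => pr + v
      | none =>
        match (PySem.Dict.mk O).get? [h2, h1] with
        | some v => pr + v
        | none => pr) = fun pr h2 => pr + pvF O h1 h2 := by
    intro h1
    funext pr h2
    unfold pvF
    rcases (PySem.Dict.mk O).get? [h1, h2] with _ | v
    · rcases (PySem.Dict.mk O).get? [h2, h1] with _ | w <;> simp
    · simp
  have hout : (fun (pr : Int) (h1 : Int) => List.foldl (fun (pr : Int) (h2 : Int) =>
      match (PySem.Dict.mk O).get? [h1, h2] with
      | some v => pr + v
      | none =>
        match (PySem.Dict.mk O).get? [h2, h1] with
        | some v => pr + v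
        | none => pr) pr l2)
      = fun pr h1 => pr + (l2.map (fun h2 => pvF O h1 h2)).sum := by
    funext pr h1
    rw [hin h1, PySem.List.foldl_add]
  rw [hout, PySem.List.foldl_add]
  simp

lemma pv_B_eq_sum (O : List (List Int × Int)) (l1 l2 : List Int) :
    get_all_pr_between_two_set_of_HOGs_alt O l1 l2 = (O.map (pvG O l1 l2)).sum := by
  unfold get_all_pr_between_two_set_of_HOGs_alt
  simp only []
  have hbody : (fun (total : Int) (kv : List Int × Int) =>
      match kv.1 with
      | [a, b] =>
        let t := total + kv.2 * ((l1.foldl (fun d h => d.insert h (d.getD h 0 + 1)) PySem.Dict.empty).getD a 0)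
          * ((l2.foldl (fun d h => d.insert h (d.getD h 0 + 1)) PySem.Dict.empty).getD b 0)
        if (PySem.Dict.mk O).contains [b, a] then t
        else t + kv.2 * ((l1.foldl (fun d h => d.insert h (d.getD h 0 + 1)) PySem.Dict.empty).getD b 0)
          * ((l2.foldl (fun d h => d.insert h (d.getD h 0 + 1)) PySem.Dict.empty).getD a 0)
      | _ => total) = fun total kv => total + pvG O l1 l2 kv := by
    funext total kv
    rcases kv with ⟨k, v⟩
    rcases k with _ | ⟨a, t⟩
    · simp [pvG]
    rcases t with _ | ⟨b, t2⟩
    · simp [pvG]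
    rcases t2 with _ | ⟨c, t3⟩
    · simp only [pvG, PySem.Dict.getD_foldl_insert_add_one, PySem.Dict.getD_empty, zero_add]
      by_cases hc : (PySem.Dict.mk O).contains [b, a] <;> simp [hc] <;> ring
    · simp [pvG]
  rw [hbody, PySem.List.foldl_add]
  simp

theorem pv_main (O : List (List Int × Int)) (l1 l2 : List Int)
    (hnd : (O.map Prod.fst).Nodup) :
    get_all_pr_between_two_set_of_HOGs O l1 l2 = get_all_pr_between_two_set_of_HOGs_alt O l1 l2 := by
  rw [pv_A_eq_sum, pv_B_eq_sum]
  have h1 : (l1.map (fun h1 => (l2.map (fun h2 => pvF O h1 h2)).sum)).sum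
      = (l1.map (fun h1 => (l2.map (fun h2 => (O.map (fun kv => pvE O kv h1 h2)).sum)).sum)).sum := by
    refine congrArg List.sum (List.map_congr_left fun h1 _ => ?_)
    exact congrArg List.sum (List.map_congr_left fun h2 _ => pv_f_eq_sum_e O hnd h1 h2)
  rw [h1]
  have h2 : ∀ h1 : Int, (l2.map (fun h2 => (O.map (fun kv => pvE O kv h1 h2)).sum)).sum
      = (O.map (fun kv => (l2.map (fun h2 => pvE O kv h1 h2)).sum)).sum := by
    intro h1; exact pv_sum_swap l2 O (fun kv h2 => pvE O kv h1 h2)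
  rw [List.map_congr_left (fun h1 _ => h2 h1),
    pv_sum_swap l1 O (fun kv h1 => (l2.map (fun h2 => pvE O kv h1 h2)).sum)]
  exact congrArg List.sum (List.map_congr_left fun kv hm => pv_entry_sum O hnd l1 l2 kv hm)

-- ===== VERDICT (by name: the statement is the Claim_ definition above) =====
theorem get_all_pr_between_two_set_of_HOGs_spec : Claim_equal_get_all_pr_between_two_set_of_HOGs := by
  intro O l1 l2 _ hpre
  exact pv_main O l1 l2 hpre
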